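-- pv_equiv track=rewrite | github.com/KimGyeongHyun/back | 3-05/ex_02033.py | get_round
-- ===== SOURCE A (Python) =====
-- def get_round(n):
--
--     index = 1
--
--     while 1 <= n//10**index:
--
--         num = (n//10**(index-1))%10
--         if 5 <= num:
--             n += 10**index
--
--         n -= num * 10**(index-1)
--         index += 1
--
--     return n
-- ===== SOURCE B (Python) =====
-- def get_round(n):
--     # Cascading digit rounding, written as structural recursion on n // 10:
--     # round the last digit into a carry, recurse on the shortened number.
--     if n // 10 < 1:
--         return n
--     carry = 1 if n % 10 >= 5 else 0
--     return 10 * get_round(n // 10 + carry)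
-- ===== Notes on version B (the rewrite author's own statement) =====
-- stated objective: simpler
-- what changed: Replaced the iterative loop that mutates n while tracking an index and recomputing 10**index powers by a direct structural recursion on n//10 with a half-up carry, with no index or power bookkeeping.
import Mathlib
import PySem

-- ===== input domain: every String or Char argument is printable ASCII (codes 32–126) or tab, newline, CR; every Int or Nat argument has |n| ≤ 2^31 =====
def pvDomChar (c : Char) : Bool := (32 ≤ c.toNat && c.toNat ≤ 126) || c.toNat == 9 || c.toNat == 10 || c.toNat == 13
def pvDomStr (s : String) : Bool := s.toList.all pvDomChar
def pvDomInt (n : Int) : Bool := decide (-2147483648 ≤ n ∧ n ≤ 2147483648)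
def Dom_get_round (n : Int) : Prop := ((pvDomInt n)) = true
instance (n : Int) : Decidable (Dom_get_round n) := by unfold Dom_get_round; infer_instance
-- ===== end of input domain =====

-- B replaces A's index/power-mutating while loop by a direct structural recursion on n // 10
-- with a half-up carry (objective: simpler).


-- ===== PORT A =====
-- A's while loop, step for step; `index` starts at 1 and only grows, so it is kept as a Nat
-- exponent. The loop is run on a fuel of 64 iterations, which exceeds the loop's iteration
-- count for every n ≤ 10^64 (proved below via the invariant kept by loop_eq); Dom keeps |n| ≤ 2^31.
def getRoundLoop : Nat → Int → Nat → Int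
  | 0, n, _ => n
  | fuel + 1, n, index =>
    if 1 ≤ PySem.Int.floordiv n (10 ^ index) then
      let num := PySem.Int.mod (PySem.Int.floordiv n (10 ^ (index - 1))) 10
      let n' := if 5 ≤ num then n + 10 ^ index else n
      getRoundLoop fuel (n' - num * 10 ^ (index - 1)) (index + 1)
    else n

def get_round (n : Int) : Int := getRoundLoop 64 n 1

-- ===== PORT B =====
-- Source B: if n//10 < 1 return n; else carry = 1 if n%10 >= 5 else 0; return 10*get_round(n//10+carry)
def get_round_alt (n : Int) : Int :=
  if PySem.Int.floordiv n 10 < 1 then n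
  else 10 * get_round_alt (PySem.Int.floordiv n 10 + (if 5 ≤ PySem.Int.mod n 10 then 1 else 0))
termination_by n.toNat
decreasing_by
  simp only [PySem.Int.floordiv_eq_ediv_of_pos (by norm_num : (0:Int) < 10)] at *
  split <;> omega

-- ===== PRECONDITION & SPEC =====
def Spec_get_round (n : Int) (out : Int) : Prop := out = get_round_alt n
instance (n : Int) (out : Int) : Decidable (Spec_get_round n out) := by unfold Spec_get_round; infer_instance

-- ===== CLAIM (what is proved, stated in full; the proofs are below) =====
def Claim_equal_get_round : Prop := ∀ (n : Int), Dom_get_round n → Spec_get_round n (get_round n)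

-- ===== LEMMAS AND PROOFS =====

-- One unfolding step of B's recursion.
theorem alt_eq (n : Int) :
    get_round_alt n =
      if PySem.Int.floordiv n 10 < 1 then n
      else 10 * get_round_alt (PySem.Int.floordiv n 10 +
        (if 5 ≤ PySem.Int.mod n 10 then 1 else 0)) := by
  conv_lhs => rw [get_round_alt]

-- Loop invariant: at loop entry with exponent `index`, the state is 10^(index-1) * m and the
-- remaining loop computes 10^(index-1) * get_round_alt m, provided m ≤ 10^fuel.
theorem loop_eq (fuel : Nat) (index : Nat) (m : Int)
    (hidx : 1 ≤ index) (hm : m ≤ 10 ^ fuel) :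
    getRoundLoop fuel (10 ^ (index - 1) * m) index = 10 ^ (index - 1) * get_round_alt m := by
  induction fuel generalizing index m with
  | zero =>
    have hc : PySem.Int.floordiv m 10 < 1 := by
      rw [PySem.Int.floordiv_eq_ediv_of_pos (by norm_num : (0:Int) < 10)]
      norm_num at hm
      omega
    rw [alt_eq m, if_pos hc]
    simp only [getRoundLoop]
  | succ fuel ih =>
    have hpow : (0:Int) < 10 ^ (index - 1) := by positivity
    have hpowsplit : (10:Int) ^ index = 10 ^ (index - 1) * 10 := by
      rw [← pow_succ]
      congr 1
      omega
    have hcond : PySem.Int.floordiv (10 ^ (index - 1) * m) (10 ^ index)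
        = PySem.Int.floordiv m 10 := by
      rw [PySem.Int.floordiv_eq_ediv_of_pos (by positivity : (0:Int) < 10 ^ index),
          PySem.Int.floordiv_eq_ediv_of_pos (by norm_num : (0:Int) < 10), hpowsplit]
      exact Int.mul_ediv_mul_of_pos m 10 hpow
    have hnum : PySem.Int.floordiv (10 ^ (index - 1) * m) (10 ^ (index - 1)) = m := by
      rw [PySem.Int.floordiv_eq_ediv_of_pos hpow]
      exact Int.mul_ediv_cancel_left m hpow.ne'
    simp only [getRoundLoop, hcond, hnum]
    rw [alt_eq m]
    by_cases hc : PySem.Int.floordiv m 10 < 1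
    · rw [if_neg (by omega : ¬ (1:Int) ≤ PySem.Int.floordiv m 10), if_pos hc]
    · rw [if_pos (by omega : (1:Int) ≤ PySem.Int.floordiv m 10), if_neg hc]
      set q := PySem.Int.floordiv m 10 with hqdef
      set r := PySem.Int.mod m 10 with hrdef
      have hqr : 10 * q + r = m ∧ 0 ≤ r ∧ r < 10 := by
        rw [hqdef, hrdef, PySem.Int.floordiv_eq_ediv_of_pos (by norm_num : (0:Int) < 10),
            PySem.Int.mod_eq_emod_of_pos (by norm_num : (0:Int) < 10)]
        exact ⟨Int.mul_ediv_add_emod m 10,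
               Int.emod_nonneg m (by norm_num),
               Int.emod_lt_of_pos m (by norm_num)⟩
      have hstep : (if 5 ≤ r then 10 ^ (index - 1) * m + 10 ^ index else 10 ^ (index - 1) * m)
          - r * 10 ^ (index - 1)
          = 10 ^ ((index + 1) - 1) * (q + if 5 ≤ r then 1 else 0) := by
        have h1 : (10:Int) ^ ((index + 1) - 1) = 10 ^ (index - 1) * 10 := by
          rw [← pow_succ]
          congr 1
          omega
        rw [h1, hpowsplit]
        split_ifs <;> linear_combination (-(10:Int) ^ (index - 1)) * hqr.1
      have hfuel : q + (if 5 ≤ r then 1 else 0) ≤ 10 ^ fuel := by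
        have hmle : m ≤ 10 * 10 ^ fuel := by
          calc m ≤ 10 ^ (fuel + 1) := hm
          _ = 10 * 10 ^ fuel := by ring
        split_ifs <;> omega
      rw [hstep, ih (index + 1) (q + if 5 ≤ r then 1 else 0) (by omega) hfuel]
      simp only [Nat.add_sub_cancel]
      rw [hpowsplit]
      ring

-- ===== VERDICT (by name: the statement is the Claim_ definition above) =====
theorem get_round_spec : Claim_equal_get_round := by
  intro n hdom
  unfold Spec_get_round get_round
  have hd : -2147483648 ≤ n ∧ n ≤ 2147483648 := by
    simpa [Dom_get_round, pvDomInt] using hdom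
  have hb : n ≤ 10 ^ 64 := by
    have h64 : (2147483648:Int) ≤ 10 ^ 64 := by norm_num
    omega
  have h := loop_eq 64 1 n (le_refl 1) hb
  simpa using h
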